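-- pv_equiv track=rewrite | github.com/Open-Mobile-Kit/ba_ai_builder | agents/refiner.py | _analyze_feedback
-- ===== SOURCE A (Python) =====
-- def _analyze_feedback(feedback: str) -> str:
--     """Analyze feedback to determine appropriate refinement strategy"""
--     feedback_lower = feedback.lower()
--
--     if any(keyword in feedback_lower for keyword in ['structure', 'organize', 'format', 'section']):
--         return "structure_improvement"
--     elif any(keyword in feedback_lower for keyword in ['unclear', 'confusing', 'explain', 'clarify']):
--         return "clarity_optimization"
--     elif any(keyword in feedback_lower for keyword in ['missing', 'incomplete', 'add', 'include']):
--         return "completeness_check"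
--     else:
--         return "content_enhancement"
-- ===== SOURCE B (Python) =====
-- _KEYWORDS = [
--     ("structure", "structure_improvement"),
--     ("organize", "structure_improvement"),
--     ("format", "structure_improvement"),
--     ("section", "structure_improvement"),
--     ("unclear", "clarity_optimization"),
--     ("confusing", "clarity_optimization"),
--     ("explain", "clarity_optimization"),
--     ("clarify", "clarity_optimization"),
--     ("missing", "completeness_check"),
--     ("incomplete", "completeness_check"),
--     ("add", "completeness_check"),
--     ("include", "completeness_check"),
-- ]
--
-- _PRIORITY = ["structure_improvement", "clarity_optimization", "completeness_check"]
--
--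
-- def _analyze_feedback(feedback: str) -> str:
--     # Single left-to-right scan over the text: at each position try every
--     # keyword as a prefix match, accumulating the set of triggered strategies;
--     # then resolve by priority.  (Naive multi-pattern matcher vs A's twelve
--     # independent substring-membership tests.)
--     text = feedback.lower()
--     found = set()
--     for i in range(len(text) + 1):
--         for kw, label in _KEYWORDS:
--             if text[i:i + len(kw)] == kw:
--                 found.add(label)
--     for label in _PRIORITY:
--         if label in found:
--             return label
--     return "content_enhancement"
-- ===== Notes on version B (the rewrite author's own statement) =====
-- stated objective: alternative
-- what changed: Replaces twelve independent substring-membership tests chained by if/elif with a single left-to-right scan of the text that prefix-matches all twelve keywords at each position, accumulating a set of triggered strategies that is then resolved by priority; correct because a keyword occurs as a substring iff it prefix-matches at some position.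
import Mathlib
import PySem

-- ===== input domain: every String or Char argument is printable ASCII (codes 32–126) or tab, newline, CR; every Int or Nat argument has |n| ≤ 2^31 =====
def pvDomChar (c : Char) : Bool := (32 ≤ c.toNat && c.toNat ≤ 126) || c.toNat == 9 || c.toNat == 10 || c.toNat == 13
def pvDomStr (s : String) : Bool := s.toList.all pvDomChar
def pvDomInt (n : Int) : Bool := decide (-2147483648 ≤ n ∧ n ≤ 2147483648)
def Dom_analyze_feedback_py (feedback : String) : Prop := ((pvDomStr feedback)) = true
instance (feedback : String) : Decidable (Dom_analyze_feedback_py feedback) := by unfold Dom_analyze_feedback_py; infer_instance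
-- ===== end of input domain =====

-- B replaces A's chained per-keyword substring tests by one left-to-right scan prefix-matching all keywords at each position into a set, then priority resolution (alternative algorithm, same cost).


-- ===== PORT A =====
def analyze_feedback_py (feedback : String) : String :=
  let feedback_lower := PySem.Str.lower feedback
  if ["structure", "organize", "format", "section"].any
      (fun keyword => PySem.Str.isIn keyword feedback_lower) then
    "structure_improvement"
  else if ["unclear", "confusing", "explain", "clarify"].any
      (fun keyword => PySem.Str.isIn keyword feedback_lower) then
    "clarity_optimization"
  else if ["missing", "incomplete", "add", "include"].any
      (fun keyword => PySem.Str.isIn keyword feedback_lower) then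
    "completeness_check"
  else
    "content_enhancement"

-- ===== PORT B =====
def pvKeywords : List (String × String) :=
  [("structure", "structure_improvement"),
   ("organize", "structure_improvement"),
   ("format", "structure_improvement"),
   ("section", "structure_improvement"),
   ("unclear", "clarity_optimization"),
   ("confusing", "clarity_optimization"),
   ("explain", "clarity_optimization"),
   ("clarify", "clarity_optimization"),
   ("missing", "completeness_check"),
   ("incomplete", "completeness_check"),
   ("add", "completeness_check"),
   ("include", "completeness_check")]

def pvPriority : List String :=
  ["structure_improvement", "clarity_optimization", "completeness_check"]

def analyze_feedback_py_alt (feedback : String) : String :=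
  let text := PySem.Str.lower feedback
  let found : PySem.Set String :=
    (PySem.List.pyRange 0 (PySem.Str.len text + 1) 1).foldl
      (fun found i =>
        pvKeywords.foldl
          (fun found p =>
            if PySem.Str.slice text (some i) (some (i + PySem.Str.len p.1)) == p.1
            then PySem.Set.add found p.2 else found)
          found)
      PySem.Set.empty
  match pvPriority.find? (fun label => PySem.Set.contains found label) with
  | some label => label
  | none => "content_enhancement"

-- ===== PRECONDITION & SPEC =====
def Spec_analyze_feedback_py (feedback : String) (out : String) : Prop := out = analyze_feedback_py_alt feedback
instance (feedback : String) (out : String) : Decidable (Spec_analyze_feedback_py feedback out) := by unfold Spec_analyze_feedback_py; infer_instance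

-- ===== CLAIM =====
def Claim_equal_analyze_feedback_py : Prop := ∀ (feedback : String), Dom_analyze_feedback_py feedback → Spec_analyze_feedback_py feedback (analyze_feedback_py feedback)

-- ===== LEMMAS AND PROOFS =====

-- membership in the inner if-add fold
theorem pv_mem_foldl_addIf {α : Type} (l : List α) (f : α → Bool) (g : α → String)
    (s : PySem.Set String) (x : String) :
    (x ∈ l.foldl (fun s a => if f a then PySem.Set.add s (g a) else s) s) ↔
      x ∈ s ∨ ∃ a ∈ l, f a = true ∧ g a = x := by
  induction l generalizing s with
  | nil => simp
  | cons h t ih =>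
    simp only [List.foldl_cons, ih, List.mem_cons]
    by_cases hf : f h
    · simp only [hf, if_pos, PySem.Set.mem_add]
      constructor
      · rintro ((hx | hx) | ⟨a, ha, hfa, hg⟩)
        · exact Or.inl hx
        · exact Or.inr ⟨h, Or.inl rfl, hf, hx.symm⟩
        · exact Or.inr ⟨a, Or.inr ha, hfa, hg⟩
      · rintro (hx | ⟨a, (rfl | ha), hfa, hg⟩)
        · exact Or.inl (Or.inl hx)
        · exact Or.inl (Or.inr hg.symm)
        · exact Or.inr ⟨a, ha, hfa, hg⟩
    · simp only [hf, if_neg, Bool.false_eq_true, not_false_iff]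
      constructor
      · rintro (hx | ⟨a, ha, hfa, hg⟩)
        · exact Or.inl hx
        · exact Or.inr ⟨a, Or.inr ha, hfa, hg⟩
      · rintro (hx | ⟨a, (rfl | ha), hfa, hg⟩)
        · exact Or.inl hx
        · exact absurd hfa (by simp [hf])
        · exact Or.inr ⟨a, ha, hfa, hg⟩

-- membership in the whole two-level scan fold
theorem pv_mem_scan (kws : List (String × String)) (cond : Int → String → Bool)
    (idxs : List Int) (s : PySem.Set String) (x : String) :
    (x ∈ idxs.foldl
        (fun s i => kws.foldl (fun s p => if cond i p.1 then PySem.Set.add s p.2 else s) s) s) ↔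
      x ∈ s ∨ ∃ i ∈ idxs, ∃ p ∈ kws, cond i p.1 = true ∧ p.2 = x := by
  induction idxs generalizing s with
  | nil => simp
  | cons h t ih =>
    simp only [List.foldl_cons, ih, pv_mem_foldl_addIf kws (fun p => cond h p.1) (fun p => p.2),
      List.mem_cons]
    constructor
    · rintro ((hx | ⟨p, hp, hc, hg⟩) | ⟨i, hi, p, hp, hc, hg⟩)
      · exact Or.inl hx
      · exact Or.inr ⟨h, Or.inl rfl, p, hp, hc, hg⟩
      · exact Or.inr ⟨i, Or.inr hi, p, hp, hc, hg⟩
    · rintro (hx | ⟨i, (rfl | hi), p, hp, hc, hg⟩)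
      · exact Or.inl (Or.inl hx)
      · exact Or.inl (Or.inr ⟨p, hp, hc, hg⟩)
      · exact Or.inr ⟨i, hi, p, hp, hc, hg⟩

-- a prefix match of a keyword at some scanned position ↔ substring membership
theorem pv_exists_slice_iff_isIn (t kw : String) :
    (∃ i ∈ PySem.List.pyRange 0 (PySem.Str.len t + 1) 1,
        (PySem.Str.slice t (some i) (some (i + PySem.Str.len kw)) == kw) = true) ↔
      PySem.Str.isIn kw t = true := by
  rw [PySem.Str.isIn_eq, ← PySem.Chars.exists_prefix_drop_iff_isIn]
  constructor
  · rintro ⟨i, hi, hslice⟩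
    rw [PySem.List.mem_pyRange_one] at hi
    obtain ⟨j, rfl⟩ := Int.eq_ofNat_of_zero_le hi.1
    refine ⟨j, ?_⟩
    have heq : PySem.Str.slice t (some (j : Int)) (some ((j : Int) + PySem.Str.len kw)) = kw :=
      eq_of_beq hslice
    have hlist : (t.toList.drop j).take kw.toList.length = kw.toList := by
      have h2 := congrArg String.toList heq
      rwa [PySem.Str.toList_slice, PySem.Chars.slice_eq_listSlice, PySem.Str.len_eq,
        PySem.List.slice_natCast_add] at h2
    rw [List.prefix_iff_eq_take]
    exact hlist.symm
  · rintro ⟨j, hj⟩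
    have hdropeq : t.toList.drop (min j t.toList.length) = t.toList.drop j := by
      rcases le_total j t.toList.length with h | h
      · rw [min_eq_left h]
      · rw [min_eq_right h, List.drop_eq_nil_of_le h, List.drop_eq_nil_of_le le_rfl]
    refine ⟨((min j t.toList.length : Nat) : Int), ?_, ?_⟩
    · rw [PySem.List.mem_pyRange_one]
      refine ⟨Int.natCast_nonneg _, ?_⟩
      rw [PySem.Str.len_eq]
      exact_mod_cast Nat.lt_succ_of_le (min_le_right _ _)
    · apply beq_of_eq
      rw [← String.toList_inj, PySem.Str.toList_slice, PySem.Chars.slice_eq_listSlice,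
        PySem.Str.len_eq, PySem.List.slice_natCast_add]
      rw [hdropeq]
      exact ((List.prefix_iff_eq_take.mp hj).symm)

-- characterisation of the scan's accumulated strategy set
theorem pv_found_iff (t x : String) :
    (x ∈ (PySem.List.pyRange 0 (PySem.Str.len t + 1) 1).foldl
        (fun found i =>
          pvKeywords.foldl
            (fun found p =>
              if PySem.Str.slice t (some i) (some (i + PySem.Str.len p.1)) == p.1
              then PySem.Set.add found p.2 else found)
            found)
        PySem.Set.empty) ↔
      ∃ p ∈ pvKeywords, PySem.Str.isIn p.1 t = true ∧ p.2 = x := by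
  rw [pv_mem_scan pvKeywords
    (fun i kw => PySem.Str.slice t (some i) (some (i + PySem.Str.len kw)) == kw)]
  have hempty : (x ∈ (PySem.Set.empty : PySem.Set String)) ↔ False := by
    simp [PySem.Set.empty]
  rw [hempty, false_or]
  constructor
  · rintro ⟨i, hi, p, hp, hc, hg⟩
    exact ⟨p, hp, (pv_exists_slice_iff_isIn t p.1).mp ⟨i, hi, hc⟩, hg⟩
  · rintro ⟨p, hp, hin, hg⟩
    obtain ⟨i, hi, hc⟩ := (pv_exists_slice_iff_isIn t p.1).mpr hin
    exact ⟨i, hi, p, hp, hc, hg⟩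

-- ===== VERDICT =====
theorem analyze_feedback_py_spec : Claim_equal_analyze_feedback_py := by
  intro feedback _
  unfold Spec_analyze_feedback_py analyze_feedback_py analyze_feedback_py_alt
  simp only []
  set t := PySem.Str.lower feedback with ht
  have hfound := pv_found_iff t
  set found := (PySem.List.pyRange 0 (PySem.Str.len t + 1) 1).foldl
      (fun found i =>
        pvKeywords.foldl
          (fun found p =>
            if PySem.Str.slice t (some i) (some (i + PySem.Str.len p.1)) == p.1
            then PySem.Set.add found p.2 else found)
          found)
      PySem.Set.empty with hfset
  have hc : ∀ x, PySem.Set.contains found x = true ↔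
      ∃ p ∈ pvKeywords, PySem.Str.isIn p.1 t = true ∧ p.2 = x := by
    intro x; rw [PySem.Set.contains_iff]; exact hfound x
  clear hfound hfset
  have e1 : PySem.Set.contains found "structure_improvement" =
      (["structure", "organize", "format", "section"].any
        (fun keyword => PySem.Str.isIn keyword t)) := by
    rw [Bool.eq_iff_iff, hc]; simp [pvKeywords]
  have e2 : PySem.Set.contains found "clarity_optimization" =
      (["unclear", "confusing", "explain", "clarify"].any
        (fun keyword => PySem.Str.isIn keyword t)) := by
    rw [Bool.eq_iff_iff, hc]; simp [pvKeywords]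
  have e3 : PySem.Set.contains found "completeness_check" =
      (["missing", "incomplete", "add", "include"].any
        (fun keyword => PySem.Str.isIn keyword t)) := by
    rw [Bool.eq_iff_iff, hc]; simp [pvKeywords]
  clear hc
  simp only [pvPriority]
  by_cases h1 : (["structure", "organize", "format", "section"].any
      (fun keyword => PySem.Str.isIn keyword t)) = true
  · rw [if_pos h1, List.find?_cons_of_pos (by rw [e1]; exact h1)]
  · rw [if_neg h1, List.find?_cons_of_neg (by rw [e1]; exact h1)]
    by_cases h2 : (["unclear", "confusing", "explain", "clarify"].any
        (fun keyword => PySem.Str.isIn keyword t)) = true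
    · rw [if_pos h2, List.find?_cons_of_pos (by rw [e2]; exact h2)]
    · rw [if_neg h2, List.find?_cons_of_neg (by rw [e2]; exact h2)]
      by_cases h3 : (["missing", "incomplete", "add", "include"].any
          (fun keyword => PySem.Str.isIn keyword t)) = true
      · rw [if_pos h3, List.find?_cons_of_pos (by rw [e3]; exact h3)]
      · rw [if_neg h3, List.find?_cons_of_neg (by rw [e3]; exact h3), List.find?_nil]
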